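-- pv_equiv track=rewrite | github.com/Percy-Ikana/AOC-2024 | day21/challenge.py | inputSim
-- ===== SOURCE A (Python) =====
-- from collections import Counter
--
-- keyGrid = {c: (i % 3, i // 3) for i, c in enumerate("789456123 0A")}
--
-- counterGrid = {c: (i % 3, i // 3) for i, c in enumerate(" ^A<v>")}
--
-- def steps(controls, instructions, count=1):
--     startX, startY = controls["A"]
--     emptyX, emptyY = controls[" "]
--     results = Counter()
--     for c in instructions:
--         instX, instY = controls[c]
--         #Check if we would pass over the empty square, if yes, mark thi inst for flipping the order.
--         f = instX == emptyX and startY == emptyY or instY == emptyY and startX == emptyX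
--         results[(instX - startX, instY - startY, f)] += count
--         startX, startY = instX, instY
--     return results
--
-- def inputSim(inputs, robots):
--     r = 0
--     for input in inputs:
--         res = steps(keyGrid, input)
--         for _ in range(robots+1):
--             pass
--             total = []
--             for x,y, flip in res:
--                 #we want to move far away first, since we want the last move to be closest to A,
--                 #Although we have to do the other order if the best order passes over the panic square
--                 string = ("<" * -x + "v" * y + "^" * -y + ">" * x)
--                 string = string[:: -1 if flip else 1] + "A"
--                 path = steps(counterGrid, string, res[(x, y, flip)])
--                 total.append(path)
--             res = sum(total, Counter())
--         r += res.total() * int(input[:3])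
--     return r
-- ===== SOURCE B (Python) =====
-- keyGrid = {c: (i % 3, i // 3) for i, c in enumerate("789456123 0A")}
--
-- counterGrid = {c: (i % 3, i // 3) for i, c in enumerate(" ^A<v>")}
--
-- def _transition(grid, a, b):
--     # the move string pressed on the next keypad to go from button a to button b (then press A)
--     ax, ay = grid[a]
--     bx, by = grid[b]
--     ex, ey = grid[" "]
--     dx, dy = bx - ax, by - ay
--     flip = bx == ex and ay == ey or by == ey and ax == ex
--     s = "<" * -dx + "v" * dy + "^" * -dy + ">" * dx
--     return (s[::-1] if flip else s) + "A"
--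
-- def _pairs(s):
--     return list(zip("A" + s, s))
--
-- def inputSim(inputs, robots):
--     pad = "^A<v>"
--     # DP table: cost[(a,b)] = presses at the bottom for one a->b transition with j robot layers below
--     cost = {(a, b): 1 for a in pad for b in pad}
--     for _ in range(robots):
--         cost = {(a, b): sum(cost[p] for p in _pairs(_transition(counterGrid, a, b)))
--                 for a in pad for b in pad}
--     r = 0
--     for input in inputs:
--         length = sum(cost[p]
--                      for a, b in _pairs(input)
--                      for p in _pairs(_transition(keyGrid, a, b)))
--         r += length * int(input[:3])
--     return r
-- ===== Notes on version B (the rewrite author's own statement) =====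
-- stated objective: faster
-- what changed: Replaces A's per-code iterated Counter-of-move-deltas simulation by one bottom-up DP table of per-transition press costs over the control pad, built once and shared by all codes; Pre_ restricts robots to its natural domain 0 <= robots (a robot count), since negative counts are outside the task's meaning and A's value there is an accident of range(robots+1) running zero times.
-- outside the precondition, e.g. on inputSim(['029A'], -1): A returns 116, B returns 348
import Mathlib
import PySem

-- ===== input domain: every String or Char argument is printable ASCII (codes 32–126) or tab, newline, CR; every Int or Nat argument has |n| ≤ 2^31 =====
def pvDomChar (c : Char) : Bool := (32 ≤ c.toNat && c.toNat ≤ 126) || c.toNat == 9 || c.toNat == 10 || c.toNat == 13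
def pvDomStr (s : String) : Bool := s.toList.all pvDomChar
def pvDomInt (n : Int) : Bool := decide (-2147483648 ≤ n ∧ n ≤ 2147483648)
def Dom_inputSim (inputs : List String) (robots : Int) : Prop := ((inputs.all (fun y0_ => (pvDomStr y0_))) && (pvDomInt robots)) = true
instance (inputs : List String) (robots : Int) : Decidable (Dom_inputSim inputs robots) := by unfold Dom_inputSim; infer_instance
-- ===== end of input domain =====

-- B replaces A's per-input iterated Counter-of-deltas simulation by one shared DP table of
-- per-transition costs over the control pad (objective: faster, one table shared by all codes).

-- ===== PORT A =====

-- module-level grids, shared by both Pythons: {c: (i % 3, i // 3) for i, c in enumerate(s)}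
def mkGrid (s : String) : PySem.Dict Char (Int × Int) :=
  (PySem.List.enumerate s.toList).foldl
    (fun d ic => d.insert ic.2 (PySem.Int.mod ic.1 3, PySem.Int.floordiv ic.1 3))
    PySem.Dict.empty

def keyGrid : PySem.Dict Char (Int × Int) := mkGrid "789456123 0A"

def counterGrid : PySem.Dict Char (Int × Int) := mkGrid " ^A<v>"

-- controls[c]; Python raises KeyError on a missing key — Pre_ excludes those inputs, the default is never used inside Pre_
def gget (d : PySem.Dict Char (Int × Int)) (c : Char) : Int × Int := d.getD c (0, 0)

def stepsA (controls : PySem.Dict Char (Int × Int)) (instructions : List Char) (count : Int) :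
    PySem.Dict (Int × Int × Bool) Int :=
  (instructions.foldl
    (fun (st : (Int × Int) × PySem.Dict (Int × Int × Bool) Int) c =>
      let p := gget controls c
      let e := gget controls ' '
      let f : Bool := (p.1 == e.1 && st.1.2 == e.2) || (p.2 == e.2 && st.1.1 == e.1)
      (p, st.2.modify (p.1 - st.1.1, p.2 - st.1.2, f) 0 (· + count)))
    (gget controls 'A', PySem.Dict.empty)).2

-- Counter.__add__ (drops non-positive counts), faithful to CPython
def counterAdd (a b : PySem.Dict (Int × Int × Bool) Int) : PySem.Dict (Int × Int × Bool) Int :=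
  let r1 := a.items.foldl
    (fun r kc =>
      let n := kc.2 + b.getD kc.1 0
      if n > 0 then r.insert kc.1 n else r)
    PySem.Dict.empty
  b.items.foldl
    (fun r kc => if !a.contains kc.1 && kc.2 > 0 then r.insert kc.1 kc.2 else r)
    r1

-- one pass of A's inner 'for _ in range(robots+1)' loop body
-- ("<" * -x is "" for x ≥ 0, matched by Int.toNat clamping; s[::-1] is List.reverse, s[::1] is s)
def inputSimStep (res : PySem.Dict (Int × Int × Bool) Int) : PySem.Dict (Int × Int × Bool) Int :=
  let total := res.keys.foldl
    (fun acc k =>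
      let s0 := List.replicate (-k.1).toNat '<' ++ List.replicate k.2.1.toNat 'v'
             ++ List.replicate (-k.2.1).toNat '^' ++ List.replicate k.1.toNat '>'
      let str := (if k.2.2 then s0.reverse else s0) ++ ['A']
      acc ++ [stepsA counterGrid str (res.getD k 0)])
    ([] : List (PySem.Dict (Int × Int × Bool) Int))
  total.foldl counterAdd PySem.Dict.empty

-- int(input[:3]); Python raises ValueError when the prefix does not parse — Pre_ excludes that, the default is never used
def prefixInt (s : String) : Int :=
  (PySem.Int.ofChars? (PySem.List.slice s.toList none (some 3))).getD 0

def inputSim (inputs : List String) (robots : Int) : Int :=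
  inputs.foldl
    (fun r s =>
      let res0 := stepsA keyGrid s.toList 1
      let res := (PySem.List.pyRange 0 (robots + 1) 1).foldl (fun res _ => inputSimStep res) res0
      r + res.values.sum * prefixInt s)
    0

-- ===== PORT B =====

def padChars : List Char := "^A<v>".toList

def padPairs : List (Char × Char) := padChars.flatMap (fun a => padChars.map (fun b => (a, b)))

-- _transition(grid, a, b)
def transitionB (grid : PySem.Dict Char (Int × Int)) (a b : Char) : List Char :=
  let pa := gget grid a
  let pb := gget grid b
  let pe := gget grid ' '
  let dx := pb.1 - pa.1
  let dy := pb.2 - pa.2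
  let flip : Bool := (pb.1 == pe.1 && pa.2 == pe.2) || (pb.2 == pe.2 && pa.1 == pe.1)
  let s := List.replicate (-dx).toNat '<' ++ List.replicate dy.toNat 'v'
        ++ List.replicate (-dy).toNat '^' ++ List.replicate dx.toNat '>'
  (if flip then s.reverse else s) ++ ['A']

-- _pairs(s) = list(zip("A" + s, s))
def pairsB (s : List Char) : List (Char × Char) := List.zip ('A' :: s) s

def inputSim_alt (inputs : List String) (robots : Int) : Int :=
  let cost0 := padPairs.foldl (fun d p => d.insert p (1 : Int)) PySem.Dict.empty
  let cost := (PySem.List.pyRange 0 robots 1).foldl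
    (fun cost _ =>
      padPairs.foldl
        (fun d p =>
          d.insert p (((pairsB (transitionB counterGrid p.1 p.2)).map
            (fun q => cost.getD q 0)).sum))
        PySem.Dict.empty)
    cost0
  inputs.foldl
    (fun r s =>
      let len : Int :=
        ((pairsB s.toList).map (fun ab =>
          ((pairsB (transitionB keyGrid ab.1 ab.2)).map (fun q => cost.getD q 0)).sum)).sum
      r + len * prefixInt s)
    0

-- ===== PRECONDITION & SPEC =====
-- Pre_: where Python A returns normally AND the input is in the task's natural domain — every
-- char of every code is a key of keyGrid (else controls[c] raises KeyError), int(input[:3])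
-- parses (else ValueError), and 0 ≤ robots: robots is a robot COUNT, negative counts are outside
-- the task's meaning and A's value there (range(robots+1) runs zero times) is accidental.
def Pre_inputSim (inputs : List String) (robots : Int) : Prop :=
  0 ≤ robots ∧
  ∀ s ∈ inputs, (s.toList.all (fun c => "789456123 0A".toList.contains c)) = true ∧
    (PySem.Int.ofChars? (PySem.List.slice s.toList none (some 3))).isSome = true
instance (inputs : List String) (robots : Int) : Decidable (Pre_inputSim inputs robots) := by
  unfold Pre_inputSim; infer_instance

def pvWitness_inputSim : List String × Int := (["029A", "980A"], 2)

def Spec_inputSim (inputs : List String) (robots : Int) (out : Int) : Prop := out = inputSim_alt inputs robots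
instance (inputs : List String) (robots : Int) (out : Int) : Decidable (Spec_inputSim inputs robots out) := by unfold Spec_inputSim; infer_instance

-- ===== CLAIM (what is proved, stated in full; the proofs are below) =====
def Claim_equal_inputSim : Prop := ∀ (inputs : List String) (robots : Int), Dom_inputSim inputs robots → Pre_inputSim inputs robots → Spec_inputSim inputs robots (inputSim inputs robots)

-- ===== LEMMAS AND PROOFS =====

-- proof-side views of both programs

def mvString (k : Int × Int × Bool) : List Char :=
  let s0 := List.replicate (-k.1).toNat '<' ++ List.replicate k.2.1.toNat 'v'
         ++ List.replicate (-k.2.1).toNat '^' ++ List.replicate k.1.toNat '>'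
  (if k.2.2 then s0.reverse else s0) ++ ['A']

def deltaKey (g : PySem.Dict Char (Int × Int)) (a b : Char) : Int × Int × Bool :=
  let pa := gget g a
  let pb := gget g b
  let pe := gget g ' '
  (pb.1 - pa.1, pb.2 - pa.2,
    (pb.1 == pe.1 && pa.2 == pe.2) || (pb.2 == pe.2 && pa.1 == pe.1))

def transFrom (g : PySem.Dict Char (Int × Int)) (c0 : Char) (l : List Char) : List (Int × Int × Bool) :=
  (List.zip (c0 :: l) l).map (fun q => deltaKey g q.1 q.2)

def phi : Nat → (Int × Int × Bool) → Int
  | 0, _ => 1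
  | n + 1, k => ((pairsB (mvString k)).map (fun q => phi n (deltaKey counterGrid q.1 q.2))).sum

def W (f : (Int × Int × Bool) → Int) (d : PySem.Dict (Int × Int × Bool) Int) : Int :=
  (d.items.map (fun p => p.2 * f p.1)).sum

def Good (d : PySem.Dict (Int × Int × Bool) Int) : Prop :=
  d.keys.Nodup ∧ ∀ p ∈ d.items, 0 < p.2

lemma transitionB_eq (g : PySem.Dict Char (Int × Int)) (a b : Char) :
    transitionB g a b = mvString (deltaKey g a b) := rfl

lemma stepsA_aux (g : PySem.Dict Char (Int × Int)) (v : Int) (l : List Char) :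
    ∀ (c0 : Char) (d : PySem.Dict (Int × Int × Bool) Int),
    (l.foldl
      (fun (st : (Int × Int) × PySem.Dict (Int × Int × Bool) Int) c =>
        let p := gget g c
        let e := gget g ' '
        let f : Bool := (p.1 == e.1 && st.1.2 == e.2) || (p.2 == e.2 && st.1.1 == e.1)
        (p, st.2.modify (p.1 - st.1.1, p.2 - st.1.2, f) 0 (· + v)))
      (gget g c0, d)).2
    = (transFrom g c0 l).foldl (fun d k => d.modify k 0 (· + v)) d := by
  induction l with
  | nil => intro c0 d; simp [transFrom]
  | cons c t ih =>
    intro c0 d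
    simp only [List.foldl_cons, transFrom, List.zip, List.zipWith_cons_cons, List.map_cons]
    exact ih c (d.modify (deltaKey g c0 c) 0 (· + v))

lemma stepsA_eq (g : PySem.Dict Char (Int × Int)) (l : List Char) (v : Int) :
    stepsA g l v = (transFrom g 'A' l).foldl (fun d k => d.modify k 0 (· + v)) PySem.Dict.empty := by
  unfold stepsA
  exact stepsA_aux g v l 'A' PySem.Dict.empty

lemma getD_foldl_modifyAdd (T : List (Int × Int × Bool)) (d : PySem.Dict (Int × Int × Bool) Int)
    (v : Int) (q : Int × Int × Bool) :
    (T.foldl (fun d k => d.modify k 0 (· + v)) d).getD q 0 = d.getD q 0 + v * T.count q := by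
  induction T generalizing d with
  | nil => simp
  | cons k T ih =>
    simp only [List.foldl_cons, ih, PySem.Dict.getD_modify, List.count_cons]
    by_cases h : q = k
    · simp [h]; ring
    · simp [h, Ne.symm h]
lemma keys_foldl_modifyAdd (T : List (Int × Int × Bool)) (v : Int) :
    ((T.foldl (fun d k => d.modify k 0 (· + v)) PySem.Dict.empty).keys : List (Int × Int × Bool))
      = PySem.Set.ofList T := by
  have := PySem.Dict.keys_foldl_modify (l := T) (d0 := 0)
    (f := fun (_ : PySem.Dict (Int × Int × Bool) Int) (_ : Int × Int × Bool) => (· + v))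
    (d := PySem.Dict.empty)
  simpa using this

lemma nodup_keys_foldl_modifyAdd (T : List (Int × Int × Bool)) (v : Int) :
    ((T.foldl (fun d k => d.modify k 0 (· + v)) PySem.Dict.empty).keys).Nodup := by
  rw [keys_foldl_modifyAdd]
  exact PySem.Set.nodup_ofList T

lemma sum_indicator (D : List (Int × Int × Bool)) (hD : D.Nodup) (t : Int × Int × Bool)
    (ht : t ∈ D) (f : (Int × Int × Bool) → Int) :
    (D.map (fun k => if k = t then f k else 0)).sum = f t := by
  induction D with
  | nil => cases ht
  | cons a D ih =>
    simp only [List.map_cons, List.sum_cons]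
    rcases List.mem_cons.mp ht with h | h
    · have hz : ∀ k ∈ D, (if k = t then f k else 0) = 0 := by
        intro k hk
        have hne : k ≠ t := by
          rintro rfl; rw [h] at hk; exact (List.nodup_cons.mp hD).1 hk
        simp [hne]
      rw [List.map_congr_left hz]
      simp [h]
    · have hne : a ≠ t := by
        rintro rfl; exact (List.nodup_cons.mp hD).1 h
      rw [ih (List.nodup_cons.mp hD).2 h]
      simp [hne]

lemma sum_count (T : List (Int × Int × Bool)) (D : List (Int × Int × Bool)) (hD : D.Nodup)
    (hsub : ∀ t ∈ T, t ∈ D) (f : (Int × Int × Bool) → Int) :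
    (D.map (fun k => (T.count k : Int) * f k)).sum = (T.map f).sum := by
  induction T with
  | nil => simp
  | cons t T ih =>
    have h1 : ∀ k ∈ D, ((t :: T).count k : Int) * f k
        = (T.count k : Int) * f k + (if k = t then f k else 0) := by
      intro k hk
      by_cases h : k = t
      · subst h; simp [List.count_cons]; push_cast; ring
      · have hne : ¬ t = k := fun e => h (Eq.symm e)
        simp [List.count_cons, h, hne]
    rw [List.map_congr_left h1]
    rw [List.sum_map_add]
    rw [ih (fun x hx => hsub x (List.mem_cons_of_mem t hx))]
    rw [sum_indicator D hD t (hsub t List.mem_cons_self) f]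
    simp
    exact add_comm _ _
lemma sum_zero_off (g : (Int × Int × Bool) → Int) (K' ks : List (Int × Int × Bool))
    (hK : K'.Nodup) (hk : ks.Nodup) (hmem : ∀ k ∈ ks, k ∈ K')
    (hzero : ∀ k ∈ K', k ∉ ks → g k = 0) :
    (K'.map g).sum = (ks.map g).sum := by
  have hperm : (K'.filter (fun k => decide (k ∈ ks))).Perm ks := by
    apply List.perm_of_nodup_nodup_toFinset_eq (hK.filter _) hk
    ext x
    simp [List.mem_filter]
    intro h; exact hmem x h
  have hsplit := List.filter_append_perm (fun k => decide (k ∈ ks)) K'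
  calc (K'.map g).sum
      = ((K'.filter (fun k => decide (k ∈ ks)) ++ K'.filter (fun k => !decide (k ∈ ks))).map g).sum := by
        rw [List.Perm.sum_eq (List.Perm.map g hsplit)]
    _ = ((K'.filter (fun k => decide (k ∈ ks))).map g).sum
        + ((K'.filter (fun k => !decide (k ∈ ks))).map g).sum := by
        simp
    _ = (ks.map g).sum := by
        have h2 : ((K'.filter (fun k => !decide (k ∈ ks))).map g).sum = 0 := by
          apply List.sum_eq_zero
          intro x hx
          rcases List.mem_map.mp hx with ⟨k, hk', rfl⟩
          rcases List.mem_filter.mp hk' with ⟨hmemK, hnot⟩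
          exact hzero k hmemK (by simpa using hnot)
        rw [h2, add_zero, List.Perm.sum_eq (List.Perm.map g hperm)]

lemma W_eq_sum_keys (d : PySem.Dict (Int × Int × Bool) Int) (hnd : d.keys.Nodup)
    (f : (Int × Int × Bool) → Int) :
    W f d = (d.keys.map (fun k => d.getD k 0 * f k)).sum := by
  unfold W
  rw [PySem.Dict.items_eq_map_keys d hnd 0]
  simp [Function.comp_def]

lemma sum_over_superset (d : PySem.Dict (Int × Int × Bool) Int) (hnd : d.keys.Nodup)
    (K' : List (Int × Int × Bool)) (hK : K'.Nodup) (hsub : ∀ k ∈ d.keys, k ∈ K')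
    (f : (Int × Int × Bool) → Int) :
    (K'.map (fun k => d.getD k 0 * f k)).sum = W f d := by
  rw [W_eq_sum_keys d hnd f]
  apply sum_zero_off _ _ _ hK hnd hsub
  intro k _ hknot
  have hc : d.contains k = false := by
    by_contra h
    have : d.contains k = true := by simpa using h
    exact hknot ((PySem.Dict.contains_iff_mem_keys (d := d) (k := k)).mp this)
  rw [PySem.Dict.getD_of_not_contains d 0 hc]
  ring
lemma getD_nonneg (d : PySem.Dict (Int × Int × Bool) Int) (hd : Good d) (q : Int × Int × Bool) :
    0 ≤ d.getD q 0 := by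
  rw [PySem.Dict.getD_eq_get?_getD]
  cases h : d.get? q with
  | none => simp
  | some v =>
    have := hd.2 (q, v) (PySem.Dict.mem_items_of_get?_eq_some (d := d) h)
    simpa using le_of_lt this

lemma items_counterAdd (a b : PySem.Dict (Int × Int × Bool) Int) (ha : Good a) (hb : Good b) :
    (counterAdd a b).items
      = a.items.map (fun p => (p.1, p.2 + b.getD p.1 0))
        ++ b.items.filter (fun p => !a.contains p.1) := by
  unfold counterAdd
  have h1 : (a.items.foldl
      (fun r kc =>
        let n := kc.2 + b.getD kc.1 0
        if n > 0 then r.insert kc.1 n else r)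
      (PySem.Dict.empty : PySem.Dict (Int × Int × Bool) Int))
      = a.items.foldl (fun r kc => r.insert kc.1 (kc.2 + b.getD kc.1 0)) PySem.Dict.empty := by
    apply PySem.List.foldl_congr_mem'
    intro kc hkc r
    have hpos : 0 < kc.2 + b.getD kc.1 0 :=
      add_pos_of_pos_of_nonneg (ha.2 kc hkc) (getD_nonneg b hb kc.1)
    simp [hpos]
  rw [h1]
  have hfresh1 : ∀ p ∈ a.items,
      (PySem.Dict.empty : PySem.Dict (Int × Int × Bool) Int).contains p.1 = false := by
    intro p _; simp
  have hnd1 : (a.items.map Prod.fst).Nodup := ha.1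
  have hr1 : (a.items.foldl (fun r kc => r.insert kc.1 (kc.2 + b.getD kc.1 0)) PySem.Dict.empty).items
      = a.items.map (fun p => (p.1, p.2 + b.getD p.1 0)) := by
    have := PySem.Dict.items_foldl_insert_fresh a.items Prod.fst
      (fun p => p.2 + b.getD p.1 0) PySem.Dict.empty hfresh1 hnd1
    simpa using this
  set r1 := a.items.foldl (fun r kc => r.insert kc.1 (kc.2 + b.getD kc.1 0)) PySem.Dict.empty with hr1def
  have h2 : (b.items.foldl
      (fun r kc => if !a.contains kc.1 && kc.2 > 0 then r.insert kc.1 kc.2 else r) r1)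
      = (b.items.filter (fun p => !a.contains p.1)).foldl (fun r kc => r.insert kc.1 kc.2) r1 := by
    have hcong : (b.items.foldl
        (fun r kc => if !a.contains kc.1 && kc.2 > 0 then r.insert kc.1 kc.2 else r) r1)
        = (b.items.foldl
        (fun r kc => if !a.contains kc.1 then r.insert kc.1 kc.2 else r) r1) := by
      apply PySem.List.foldl_congr_mem'
      intro kc hkc r
      have hpos : kc.2 > 0 := hb.2 kc hkc
      simp [hpos]
    rw [hcong]
    exact PySem.List.foldl_if_eq_foldl_filter (fun kc => !a.contains kc.1) _ b.items r1
  rw [h2]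
  have hkeysr1 : (r1.keys : List (Int × Int × Bool)) = a.keys := by
    show r1.items.map Prod.fst = a.items.map Prod.fst
    rw [hr1]
    simp
  have hfresh2 : ∀ p ∈ b.items.filter (fun p => !a.contains p.1), r1.contains p.1 = false := by
    intro p hp
    rcases List.mem_filter.mp hp with ⟨_, hnc⟩
    by_contra h
    have hc : r1.contains p.1 = true := by simpa using h
    have : p.1 ∈ a.keys := by
      rw [← hkeysr1]
      exact (PySem.Dict.contains_iff_mem_keys r1 p.1).mp hc
    have : a.contains p.1 = true := (PySem.Dict.contains_iff_mem_keys a p.1).mpr this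
    simp [this] at hnc
  have hnd2 : ((b.items.filter (fun p => !a.contains p.1)).map Prod.fst).Nodup := by
    have hsub : (b.items.filter (fun p => !a.contains p.1)).Sublist b.items := List.filter_sublist
    exact (hsub.map Prod.fst).nodup hb.1
  have := PySem.Dict.items_foldl_insert_fresh (b.items.filter (fun p => !a.contains p.1))
    Prod.fst Prod.snd r1 hfresh2 hnd2
  simpa [hr1] using this
lemma keys_counterAdd (a b : PySem.Dict (Int × Int × Bool) Int) (ha : Good a) (hb : Good b) :
    ((counterAdd a b).keys : List (Int × Int × Bool))
      = a.keys ++ (b.items.filter (fun p => !a.contains p.1)).map Prod.fst := by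
  show (counterAdd a b).items.map Prod.fst = _
  rw [items_counterAdd a b ha hb]
  simp [Function.comp_def]
  rfl

lemma mem_keys_counterAdd_right (a b : PySem.Dict (Int × Int × Bool) Int)
    (ha : Good a) (hb : Good b) {q : Int × Int × Bool}
    (hq : q ∈ (b.items.filter (fun p => !a.contains p.1)).map Prod.fst) :
    q ∈ b.keys ∧ q ∉ a.keys := by
  rcases List.mem_map.mp hq with ⟨p, hp, rfl⟩
  rcases List.mem_filter.mp hp with ⟨hpb, hnc⟩
  constructor
  · exact List.mem_map.mpr ⟨p, hpb, rfl⟩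
  · intro hmem
    have : a.contains p.1 = true := (PySem.Dict.contains_iff_mem_keys a p.1).mpr hmem
    simp [this] at hnc

lemma good_counterAdd (a b : PySem.Dict (Int × Int × Bool) Int) (ha : Good a) (hb : Good b) :
    Good (counterAdd a b) := by
  constructor
  · rw [keys_counterAdd a b ha hb]
    refine List.Nodup.append ha.1 ?_ ?_
    · exact ((List.filter_sublist).map Prod.fst).nodup hb.1
    · intro q hqa hqb
      exact (mem_keys_counterAdd_right a b ha hb hqb).2 hqa
  · intro p hp
    rw [items_counterAdd a b ha hb] at hp
    rcases List.mem_append.mp hp with h | h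
    · rcases List.mem_map.mp h with ⟨p', hp', rfl⟩
      exact add_pos_of_pos_of_nonneg (ha.2 p' hp') (getD_nonneg b hb p'.1)
    · exact hb.2 p (List.mem_of_mem_filter h)

lemma getD_counterAdd (a b : PySem.Dict (Int × Int × Bool) Int) (ha : Good a) (hb : Good b)
    (q : Int × Int × Bool) :
    (counterAdd a b).getD q 0 = a.getD q 0 + b.getD q 0 := by
  have hnd := (good_counterAdd a b ha hb).1
  by_cases hqa : q ∈ a.keys
  · rcases List.mem_map.mp hqa with ⟨p, hp, rfl⟩
    have hmem : (p.1, p.2 + b.getD p.1 0) ∈ (counterAdd a b).items := by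
      rw [items_counterAdd a b ha hb]
      exact List.mem_append_left _ (List.mem_map.mpr ⟨p, hp, rfl⟩)
    rw [PySem.Dict.getD_of_mem_items _ hmem hnd 0]
    rw [PySem.Dict.getD_of_mem_items a hp ha.1 0]
  · have hac : a.contains q = false := by
      by_contra h
      exact hqa ((PySem.Dict.contains_iff_mem_keys a q).mp (by simpa using h))
    rw [PySem.Dict.getD_of_not_contains a 0 hac]
    by_cases hqb : q ∈ b.keys
    · rcases List.mem_map.mp hqb with ⟨p, hp, rfl⟩
      have hmem : (p.1, p.2) ∈ (counterAdd a b).items := by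
        rw [items_counterAdd a b ha hb]
        apply List.mem_append_right
        exact List.mem_filter.mpr ⟨hp, by simp [hac]⟩
      rw [PySem.Dict.getD_of_mem_items _ hmem hnd 0]
      rw [PySem.Dict.getD_of_mem_items b hp hb.1 0]
      ring
    · have hbc : b.contains q = false := by
        by_contra h
        exact hqb ((PySem.Dict.contains_iff_mem_keys b q).mp (by simpa using h))
      rw [PySem.Dict.getD_of_not_contains b 0 hbc]
      have hcc : (counterAdd a b).contains q = false := by
        by_contra h
        have hc : (counterAdd a b).contains q = true := by simpa using h
        have := (PySem.Dict.contains_iff_mem_keys _ q).mp hc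
        rw [keys_counterAdd a b ha hb] at this
        rcases List.mem_append.mp this with h' | h'
        · exact hqa h'
        · exact hqb (mem_keys_counterAdd_right a b ha hb h').1
      rw [PySem.Dict.getD_of_not_contains _ 0 hcc]
      ring

lemma W_counterAdd (a b : PySem.Dict (Int × Int × Bool) Int) (ha : Good a) (hb : Good b)
    (f : (Int × Int × Bool) → Int) :
    W f (counterAdd a b) = W f a + W f b := by
  have hgood := good_counterAdd a b ha hb
  set K' := ((counterAdd a b).keys : List (Int × Int × Bool)) with hK'
  have step1 : W f (counterAdd a b) = (K'.map (fun k => (counterAdd a b).getD k 0 * f k)).sum :=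
    W_eq_sum_keys _ hgood.1 f
  rw [step1]
  have step2 : ∀ k ∈ K', (counterAdd a b).getD k 0 * f k
      = a.getD k 0 * f k + b.getD k 0 * f k := by
    intro k _
    rw [getD_counterAdd a b ha hb k]; ring
  rw [List.map_congr_left step2, PySem.List.sum_map_add_int]
  have hsubA : ∀ k ∈ a.keys, k ∈ K' := by
    intro k hk
    rw [hK', keys_counterAdd a b ha hb]
    exact List.mem_append_left _ hk
  have hsubB : ∀ k ∈ b.keys, k ∈ K' := by
    intro k hk
    rw [hK', keys_counterAdd a b ha hb]
    by_cases hka : k ∈ a.keys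
    · exact List.mem_append_left _ hka
    · apply List.mem_append_right
      rcases List.mem_map.mp hk with ⟨p, hp, rfl⟩
      have : a.contains p.1 = false := by
        by_contra h
        exact hka ((PySem.Dict.contains_iff_mem_keys a p.1).mp (by simpa using h))
      exact List.mem_map.mpr ⟨p, List.mem_filter.mpr ⟨hp, by simp [this]⟩, rfl⟩
  rw [sum_over_superset a ha.1 K' hgood.1 hsubA f,
      sum_over_superset b hb.1 K' hgood.1 hsubB f]

lemma good_empty : Good (PySem.Dict.empty : PySem.Dict (Int × Int × Bool) Int) := by
  constructor
  · show (List.map _ (PySem.Dict.empty : PySem.Dict (Int × Int × Bool) Int).items).Nodup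
    simp [PySem.Dict.empty]
  · intro p hp
    simp [PySem.Dict.empty] at hp

lemma W_foldl_counterAdd (L : List (PySem.Dict (Int × Int × Bool) Int))
    (acc : PySem.Dict (Int × Int × Bool) Int) (hL : ∀ d ∈ L, Good d) (hacc : Good acc) :
    Good (L.foldl counterAdd acc) ∧
      ∀ f, W f (L.foldl counterAdd acc) = W f acc + (L.map (W f)).sum := by
  induction L generalizing acc with
  | nil => exact ⟨hacc, by simp⟩
  | cons d L ih =>
    have hd := hL d List.mem_cons_self
    have hrest := ih (counterAdd acc d) (fun x hx => hL x (List.mem_cons_of_mem d hx))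
      (good_counterAdd acc d hacc hd)
    refine ⟨hrest.1, ?_⟩
    intro f
    simp only [List.foldl_cons, List.map_cons, List.sum_cons]
    rw [hrest.2 f, W_counterAdd acc d hacc hd f]
    ring
lemma good_stepsA (g : PySem.Dict Char (Int × Int)) (l : List Char) (v : Int) (hv : 0 < v) :
    Good (stepsA g l v) := by
  rw [stepsA_eq]
  constructor
  · exact nodup_keys_foldl_modifyAdd _ v
  · intro p hp
    have hnd := nodup_keys_foldl_modifyAdd (transFrom g 'A' l) v
    have hget := PySem.Dict.getD_of_mem_items _ hp hnd 0
    rw [getD_foldl_modifyAdd] at hget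
    have hkey : p.1 ∈ PySem.Set.ofList (transFrom g 'A' l) := by
      rw [← keys_foldl_modifyAdd _ v]
      exact PySem.Dict.mem_keys_of_mem_items _ hp
    have hmem : p.1 ∈ transFrom g 'A' l := (PySem.Set.mem_ofList _ _).mp hkey
    have hcount : 0 < (transFrom g 'A' l).count p.1 := List.count_pos_iff.mpr hmem
    have : (0:Int) < v * ((transFrom g 'A' l).count p.1 : Int) := by
      apply mul_pos hv
      exact_mod_cast hcount
    simp at hget
    omega

lemma W_stepsA (g : PySem.Dict Char (Int × Int)) (l : List Char) (v : Int)
    (f : (Int × Int × Bool) → Int) :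
    W f (stepsA g l v) = v * (((transFrom g 'A' l).map f).sum) := by
  rw [stepsA_eq]
  set T := transFrom g 'A' l with hT
  have hnd := nodup_keys_foldl_modifyAdd T v
  rw [W_eq_sum_keys _ hnd f]
  have hkeys := keys_foldl_modifyAdd T v
  rw [hkeys]
  have hcong : ∀ k ∈ PySem.Set.ofList T,
      (T.foldl (fun d k => d.modify k 0 (· + v)) PySem.Dict.empty).getD k 0 * f k
        = v * ((T.count k : Int) * f k) := by
    intro k _
    rw [getD_foldl_modifyAdd]
    simp
    ring
  rw [List.map_congr_left hcong]
  rw [List.sum_map_mul_left]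
  congr 1
  exact sum_count T (PySem.Set.ofList T) (PySem.Set.nodup_ofList T)
    (fun t ht => (PySem.Set.mem_ofList _ _).mpr ht) f

lemma inputSimStep_eq (res : PySem.Dict (Int × Int × Bool) Int) :
    inputSimStep res
      = ((res.keys.map (fun k => stepsA counterGrid (mvString k) (res.getD k 0)))).foldl
          counterAdd PySem.Dict.empty := by
  show (List.foldl (fun acc k => acc ++ [stepsA counterGrid (mvString k) (res.getD k 0)])
      [] res.keys).foldl counterAdd PySem.Dict.empty = _
  rw [PySem.List.foldl_append_singleton_eq_map
    (fun k => stepsA counterGrid (mvString k) (res.getD k 0)) res.keys []]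
  rfl

lemma phi_succ_eq (n : Nat) (k : Int × Int × Bool) :
    phi (n + 1) k = ((transFrom counterGrid 'A' (mvString k)).map (phi n)).sum := by
  show ((pairsB (mvString k)).map (fun q => phi n (deltaKey counterGrid q.1 q.2))).sum = _
  unfold transFrom pairsB
  rw [List.map_map]
  rfl

lemma W_step (res : PySem.Dict (Int × Int × Bool) Int) (hres : Good res) :
    Good (inputSimStep res) ∧ ∀ n, W (phi n) (inputSimStep res) = W (phi (n + 1)) res := by
  rw [inputSimStep_eq]
  have hgoodL : ∀ d ∈ res.keys.map (fun k => stepsA counterGrid (mvString k) (res.getD k 0)),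
      Good d := by
    intro d hd
    rcases List.mem_map.mp hd with ⟨k, hk, rfl⟩
    apply good_stepsA
    rcases List.mem_map.mp hk with ⟨p, hp, rfl⟩
    rw [PySem.Dict.getD_of_mem_items res ?h hres.1 0]
    · exact hres.2 p hp
    · exact hp
  have hfold := W_foldl_counterAdd _ PySem.Dict.empty hgoodL good_empty
  refine ⟨hfold.1, ?_⟩
  intro n
  rw [(hfold.2 (phi n))]
  have hWempty : W (phi n) PySem.Dict.empty = 0 := by
    unfold W
    simp [PySem.Dict.empty]
  rw [hWempty, zero_add, List.map_map]
  have hcong : ∀ k ∈ res.keys,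
      (W (phi n) ∘ fun k => stepsA counterGrid (mvString k) (res.getD k 0)) k
        = res.getD k 0 * phi (n + 1) k := by
    intro k _
    show W (phi n) (stepsA counterGrid (mvString k) (res.getD k 0)) = _
    rw [W_stepsA, phi_succ_eq]
  rw [List.map_congr_left hcong]
  rw [W_eq_sum_keys res hres.1 (phi (n + 1))]

lemma foldl_const {α β : Type} (l : List α) (g : β → β) (init : β) :
    l.foldl (fun acc _ => g acc) init = g^[l.length] init := by
  induction l generalizing init with
  | nil => rfl
  | cons x t ih =>
    simp only [List.foldl_cons, List.length_cons, ih]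
    rw [Function.iterate_succ_apply]

lemma iter_W (res : PySem.Dict (Int × Int × Bool) Int) (hres : Good res) (N : Nat) :
    Good (inputSimStep^[N] res) ∧ ∀ n, W (phi n) (inputSimStep^[N] res) = W (phi (n + N)) res := by
  induction N with
  | zero => exact ⟨hres, fun n => rfl⟩
  | succ N ih =>
    rw [Function.iterate_succ_apply']
    have hstep := W_step (inputSimStep^[N] res) ih.1
    refine ⟨hstep.1, ?_⟩
    intro n
    rw [hstep.2 n, ih.2 (n + 1)]
    have he : n + 1 + N = n + (N + 1) := by omega
    rw [he]

lemma values_sum_eq_W (d : PySem.Dict (Int × Int × Bool) Int) :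
    (d.values).sum = W (phi 0) d := by
  unfold W
  show (d.items.map Prod.snd).sum = _
  congr 1
  apply List.map_congr_left
  intro p _
  show p.2 = p.2 * phi 0 p.1
  simp [phi]
lemma length_pyRange_zero (m : Int) : (PySem.List.pyRange 0 m 1).length = m.toNat := by
  rw [PySem.List.pyRange_one]
  simp

lemma perInput_A (s : List Char) (robots : Int) :
    ((PySem.List.pyRange 0 (robots + 1) 1).foldl (fun res _ => inputSimStep res)
        (stepsA keyGrid s 1)).values.sum
      = ((transFrom keyGrid 'A' s).map (phi (robots + 1).toNat)).sum := by
  rw [foldl_const, length_pyRange_zero]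
  have hgood : Good (stepsA keyGrid s 1) := good_stepsA keyGrid s 1 (by norm_num)
  rw [values_sum_eq_W]
  rw [(iter_W (stepsA keyGrid s 1) hgood (robots + 1).toNat).2 0]
  rw [W_stepsA]
  simp

-- B's table

def tblStep (cost : PySem.Dict (Char × Char) Int) : PySem.Dict (Char × Char) Int :=
  padPairs.foldl
    (fun d p =>
      d.insert p (((pairsB (transitionB counterGrid p.1 p.2)).map
        (fun q => cost.getD q 0)).sum))
    PySem.Dict.empty

def tbl0 : PySem.Dict (Char × Char) Int :=
  padPairs.foldl (fun d p => d.insert p (1 : Int)) PySem.Dict.empty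

lemma padPairs_nodup : padPairs.Nodup := by decide

lemma pad_closed_bool :
    (padPairs.all (fun p =>
      (pairsB (transitionB counterGrid p.1 p.2)).all (fun q => padPairs.contains q))) = true := by
  rfl

lemma pad_closed : ∀ p ∈ padPairs, ∀ q ∈ pairsB (transitionB counterGrid p.1 p.2), q ∈ padPairs := by
  have h := pad_closed_bool
  rw [List.all_eq_true] at h
  intro p hp q hq
  have h2 := h p hp
  rw [List.all_eq_true] at h2
  have := h2 q hq
  simpa using this

lemma key_closed_bool :
    ("789456123 0A".toList.all (fun a => "789456123 0A".toList.all (fun b =>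
      (pairsB (transitionB keyGrid a b)).all (fun q => padPairs.contains q)))) = true := by
  rfl

lemma key_closed : ∀ a ∈ "789456123 0A".toList, ∀ b ∈ "789456123 0A".toList,
    ∀ q ∈ pairsB (transitionB keyGrid a b), q ∈ padPairs := by
  have h := key_closed_bool
  rw [List.all_eq_true] at h
  intro a ha b hb q hq
  have h2 := h a ha
  rw [List.all_eq_true] at h2
  have h3 := h2 b hb
  rw [List.all_eq_true] at h3
  have := h3 q hq
  simpa using this

lemma getD_foldl_insert_padPairs (vf : (Char × Char) → Int) :
    ∀ p ∈ padPairs,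
      (padPairs.foldl (fun d p => d.insert p (vf p)) PySem.Dict.empty).getD p 0 = vf p := by
  intro p hp
  have hfresh : ∀ q ∈ padPairs,
      (PySem.Dict.empty : PySem.Dict (Char × Char) Int).contains q = false := by
    intro q _; simp
  have hnd : (padPairs.map id).Nodup := by simpa using padPairs_nodup
  have hitems := PySem.Dict.items_foldl_insert_fresh padPairs id vf PySem.Dict.empty hfresh hnd
  simp only [id] at hitems
  have hkeys := PySem.Dict.nodup_keys_foldl_insert padPairs (fun _ p => vf p)
    (PySem.Dict.empty : PySem.Dict (Char × Char) Int) PySem.Dict.nodup_keys_empty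
  apply PySem.Dict.getD_of_mem_items _ ?_ hkeys
  rw [hitems]
  have hempty : (PySem.Dict.empty : PySem.Dict (Char × Char) Int).items = [] := rfl
  rw [hempty, List.nil_append]
  exact List.mem_map.mpr ⟨p, hp, rfl⟩
lemma tbl0_getD : ∀ p ∈ padPairs, tbl0.getD p 0 = phi 0 (deltaKey counterGrid p.1 p.2) := by
  intro p hp
  have := getD_foldl_insert_padPairs (fun _ => (1 : Int)) p hp
  simpa [tbl0, phi] using this

lemma tblStep_getD (j : Nat) (cost : PySem.Dict (Char × Char) Int)
    (h : ∀ q ∈ padPairs, cost.getD q 0 = phi j (deltaKey counterGrid q.1 q.2)) :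
    ∀ p ∈ padPairs, (tblStep cost).getD p 0 = phi (j + 1) (deltaKey counterGrid p.1 p.2) := by
  intro p hp
  have hval := getD_foldl_insert_padPairs
    (fun p => ((pairsB (transitionB counterGrid p.1 p.2)).map (fun q => cost.getD q 0)).sum) p hp
  rw [show tblStep cost = padPairs.foldl (fun d p => d.insert p
      (((pairsB (transitionB counterGrid p.1 p.2)).map (fun q => cost.getD q 0)).sum))
      PySem.Dict.empty from rfl]
  rw [hval]
  show ((pairsB (transitionB counterGrid p.1 p.2)).map (fun q => cost.getD q 0)).sum = _
  have hcong : ∀ q ∈ pairsB (transitionB counterGrid p.1 p.2),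
      cost.getD q 0 = phi j (deltaKey counterGrid q.1 q.2) := by
    intro q hq
    exact h q (pad_closed p hp q hq)
  rw [List.map_congr_left hcong]
  rw [transitionB_eq]
  rfl

lemma tbl_getD (j : Nat) :
    ∀ p ∈ padPairs, (tblStep^[j] tbl0).getD p 0 = phi j (deltaKey counterGrid p.1 p.2) := by
  induction j with
  | zero => exact tbl0_getD
  | succ j ih =>
    rw [Function.iterate_succ_apply']
    exact tblStep_getD j _ ih

-- per-input equality (0 ≤ robots from Pre_)
lemma perInput_eq (s : String) (robots : Int) (hr : 0 ≤ robots)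
    (hchars : ∀ c ∈ s.toList, c ∈ "789456123 0A".toList) :
    ((PySem.List.pyRange 0 (robots + 1) 1).foldl (fun res _ => inputSimStep res)
        (stepsA keyGrid s.toList 1)).values.sum
      = ((pairsB s.toList).map (fun ab =>
           ((pairsB (transitionB keyGrid ab.1 ab.2)).map
             (fun q => (tblStep^[robots.toNat] tbl0).getD q 0)).sum)).sum := by
  rw [perInput_A]
  have hN : (robots + 1).toNat = robots.toNat + 1 := by omega
  rw [hN]
  have hinner : ∀ ab ∈ pairsB s.toList,
      ((pairsB (transitionB keyGrid ab.1 ab.2)).map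
        (fun q => (tblStep^[robots.toNat] tbl0).getD q 0)).sum
      = phi (robots.toNat + 1) (deltaKey keyGrid ab.1 ab.2) := by
    intro ab hab
    have hmem := List.of_mem_zip hab
    have ha : ab.1 ∈ "789456123 0A".toList := by
      rcases List.mem_cons.mp hmem.1 with h | h
      · rw [h]; decide
      · exact hchars _ h
    have hb : ab.2 ∈ "789456123 0A".toList := hchars _ hmem.2
    have hcong : ∀ q ∈ pairsB (transitionB keyGrid ab.1 ab.2),
        (tblStep^[robots.toNat] tbl0).getD q 0 = phi robots.toNat (deltaKey counterGrid q.1 q.2) := by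
      intro q hq
      exact tbl_getD robots.toNat q (key_closed ab.1 ha ab.2 hb q hq)
    rw [List.map_congr_left hcong]
    rw [transitionB_eq]
    rfl
  rw [List.map_congr_left hinner]
  show _ = ((pairsB s.toList).map
    ((phi (robots.toNat + 1)) ∘ (fun ab => deltaKey keyGrid ab.1 ab.2))).sum
  rw [← List.map_map]
  rfl
lemma cost_eq_iterate (robots : Int) :
    (PySem.List.pyRange 0 robots 1).foldl
      (fun cost _ =>
        padPairs.foldl
          (fun d p =>
            d.insert p (((pairsB (transitionB counterGrid p.1 p.2)).map
              (fun q => PySem.Dict.getD cost q 0)).sum))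
          PySem.Dict.empty)
      (padPairs.foldl (fun d p => d.insert p (1 : Int)) PySem.Dict.empty)
    = tblStep^[robots.toNat] tbl0 := by
  rw [foldl_const, length_pyRange_zero]
  rfl

-- ===== VERDICT (by name: the statement is the Claim_ definition above) =====
theorem inputSim_spec : Claim_equal_inputSim := by
  intro inputs robots _hDom hPre
  unfold Spec_inputSim inputSim inputSim_alt
  apply PySem.List.foldl_congr_mem'
  intro s hs r
  simp only []
  rw [cost_eq_iterate]
  have hchars : ∀ c ∈ s.toList, c ∈ "789456123 0A".toList := by
    have h := (hPre.2 s hs).1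
    rw [List.all_eq_true] at h
    intro c hc
    simpa using h c hc
  have := perInput_eq s robots hPre.1 hchars
  rw [this]
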